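-- pv_equiv track=rewrite | github.com/htang7415/Max-Handbook | modules/ai-agents/multi-agent/debate-and-arbitration/python/debate_and_arbitration.py | vote_counts
-- ===== SOURCE A (Python) =====
-- def normalize_candidate(text: str) -> str:
--     return " ".join(text.strip().lower().split())
--
-- def vote_counts(candidates: list[str]) -> dict[str, int]:
--     counts: dict[str, int] = {}
--     for candidate in candidates:
--         normalized = normalize_candidate(candidate)
--         if not normalized:
--             continue
--         counts[normalized] = counts.get(normalized, 0) + 1
--     return counts
-- ===== SOURCE B (Python) =====
-- def _norm(text: str) -> str:
--     return " ".join(text.strip().lower().split())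
--
-- def vote_counts(candidates: list[str]) -> dict[str, int]:
--     norm = [_norm(c) for c in candidates]
--     keys = []
--     seen = set()
--     for k in norm:
--         if k and k not in seen:
--             seen.add(k)
--             keys.append(k)
--     return {k: norm.count(k) for k in keys}
-- ===== Notes on version B (the rewrite author's own statement) =====
-- stated objective: alternative
-- what changed: Replaces the single-pass live-dict counting loop by a two-phase scheme: first compute the normalized list and its distinct non-empty keys in first-occurrence order, then build the result by counting each key with list.count over the normalized list.
import Mathlib
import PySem

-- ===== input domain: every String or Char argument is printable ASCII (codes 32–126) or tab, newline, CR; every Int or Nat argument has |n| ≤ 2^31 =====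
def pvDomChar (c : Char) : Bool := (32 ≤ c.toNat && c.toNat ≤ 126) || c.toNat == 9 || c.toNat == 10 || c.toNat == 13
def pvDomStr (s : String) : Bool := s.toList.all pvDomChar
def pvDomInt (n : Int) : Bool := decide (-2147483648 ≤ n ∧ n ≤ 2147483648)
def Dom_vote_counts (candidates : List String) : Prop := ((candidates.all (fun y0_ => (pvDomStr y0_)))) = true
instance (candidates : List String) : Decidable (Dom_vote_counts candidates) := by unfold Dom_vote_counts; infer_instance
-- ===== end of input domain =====

-- B replaces A's single-pass live-dict count by: normalize all, collect distinct non-empty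
-- keys in first-occurrence order, then count each key over the normalized list (objective: alternative).

-- ===== PORT A =====
-- " ".join(text.strip().lower().split())  (shared helper of both Python files, identical source)
def normalize_candidate (text : String) : String :=
  PySem.Str.join " " (PySem.Str.split₀ (PySem.Str.lower (PySem.Str.strip text)))

def vote_counts (candidates : List String) : List (String × Int) :=
  (candidates.foldl
    (fun (counts : PySem.Dict String Int) candidate =>
      let normalized := normalize_candidate candidate
      if normalized = "" then counts
      else counts.insert normalized (counts.getD normalized 0 + 1))
    PySem.Dict.empty).items

-- ===== PORT B =====
def vote_counts_alt (candidates : List String) : List (String × Int) :=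
  let norm := candidates.map normalize_candidate
  let st := norm.foldl
    (fun (st : List String × PySem.Set String) k =>
      if k ≠ "" ∧ ¬ (PySem.Set.contains st.2 k = true) then (st.1 ++ [k], PySem.Set.add st.2 k)
      else st)
    ([], PySem.Set.empty)
  st.1.map (fun k => (k, (PySem.List.count norm k : Int)))

-- ===== PRECONDITION & SPEC =====
def Spec_vote_counts (candidates : List String) (out : List (String × Int)) : Prop := out = vote_counts_alt candidates
instance (candidates : List String) (out : List (String × Int)) : Decidable (Spec_vote_counts candidates out) := by unfold Spec_vote_counts; infer_instance

-- ===== CLAIM (what is proved, stated in full; the proofs are below) =====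
def Claim_equal_vote_counts : Prop := ∀ (candidates : List String), Dom_vote_counts candidates → Spec_vote_counts candidates (vote_counts candidates)

-- ===== LEMMAS AND PROOFS =====

-- A's fold over candidates is the counter of the filtered normalized list.
theorem voteA_eq_counter (candidates : List String) :
    vote_counts candidates =
      (PySem.Dict.counter ((candidates.map normalize_candidate).filter (fun k => decide (k ≠ "")))).items := by
  have h1 : vote_counts candidates =
      ((candidates.map normalize_candidate).foldl
        (fun (d : PySem.Dict String Int) k =>
          if k = "" then d else d.insert k (d.getD k 0 + 1))
        PySem.Dict.empty).items := by
    unfold vote_counts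
    rw [List.foldl_map]
  have h2 : (candidates.map normalize_candidate).foldl
        (fun (d : PySem.Dict String Int) k =>
          if k = "" then d else d.insert k (d.getD k 0 + 1))
        PySem.Dict.empty =
      ((candidates.map normalize_candidate).filter (fun k => decide (k ≠ ""))).foldl
        (fun (d : PySem.Dict String Int) k => d.insert k (d.getD k 0 + 1))
        PySem.Dict.empty := by
    rw [← PySem.List.foldl_ite_eq_foldl_filter (p := fun k => k ≠ "")
        (f := fun (d : PySem.Dict String Int) k => d.insert k (d.getD k 0 + 1))]
    apply PySem.List.foldl_congr_mem
    intro acc x _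
    by_cases h : x = "" <;> simp [h]
  rw [h1, h2, PySem.Dict.foldl_insert_getD_add_one_eq_counter]

-- B's key/seen fold, started from a duplicated set, keeps its two components equal
-- and computes the fold of (skip-empty) Set.add.
theorem voteB_fold_state (ns : List String) (s : PySem.Set String) :
    ns.foldl
      (fun (st : List String × PySem.Set String) k =>
        if k ≠ "" ∧ ¬ (PySem.Set.contains st.2 k = true) then (st.1 ++ [k], PySem.Set.add st.2 k)
        else st)
      (s, s) =
    (ns.foldl (fun t k => if k = "" then t else PySem.Set.add t k) s,
     ns.foldl (fun t k => if k = "" then t else PySem.Set.add t k) s) := by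
  induction ns generalizing s with
  | nil => rfl
  | cons k ns ih =>
    simp only [List.foldl_cons]
    by_cases hk : k = ""
    · simp only [hk, if_pos]
      simpa using ih s
    · simp only [if_neg hk]
      by_cases hc : PySem.Set.contains s k = true
      · have hmem : k ∈ s := by simpa using hc
        rw [if_neg (by simp [hmem]),
            show PySem.Set.add s k = s from by simp [PySem.Set.add, hmem]]
        exact ih s
      · have hnot : ¬ k ∈ s := by simpa using hc
        rw [if_pos ⟨hk, by simp [hnot]⟩,
            show PySem.Set.add s k = s ++ [k] from by simp [PySem.Set.add, hnot]]
        exact ih (s ++ [k])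

-- B's key list is set(filtered normalized list) in first-occurrence order.
theorem voteB_keys (ns : List String) :
    (ns.foldl
      (fun (st : List String × PySem.Set String) k =>
        if k ≠ "" ∧ ¬ (PySem.Set.contains st.2 k = true) then (st.1 ++ [k], PySem.Set.add st.2 k)
        else st)
      ([], PySem.Set.empty)).1 =
    PySem.Set.ofList (ns.filter (fun k => decide (k ≠ ""))) := by
  have h0 : (PySem.Set.empty : PySem.Set String) = ([] : List String) := rfl
  rw [show (([], PySem.Set.empty) : List String × PySem.Set String) = (([] : List String), ([] : List String)) from rfl]
  rw [voteB_fold_state ns ([] : List String)]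
  rw [PySem.Set.ofList_eq_foldl,
      ← PySem.List.foldl_ite_eq_foldl_filter (p := fun k => k ≠ "") (f := PySem.Set.add)]
  apply PySem.List.foldl_congr_mem
  intro acc x _
  by_cases h : x = "" <;> simp [h]

theorem vote_counts_eq_alt (candidates : List String) :
    vote_counts candidates = vote_counts_alt candidates := by
  rw [voteA_eq_counter, PySem.Dict.items_counter]
  simp only [vote_counts_alt]
  rw [voteB_keys]
  apply List.map_congr_left
  intro k hk
  have hk' : k ∈ (candidates.map normalize_candidate).filter (fun k => decide (k ≠ "")) := by
    simpa [pysem] using hk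
  have hne : k ≠ "" := by
    have := List.of_mem_filter hk'
    simpa using this
  simp only [PySem.List.count_eq]
  rw [List.count_filter (by simpa using hne)]

-- ===== VERDICT (by name: the statement is the Claim_ definition above) =====
theorem vote_counts_spec : Claim_equal_vote_counts := by
  intro candidates _
  unfold Spec_vote_counts
  exact vote_counts_eq_alt candidates
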